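-- pv_equiv track=rewrite | github.com/mvrogozov/algorithms | contest/yny_algo/66794_stack/66794_G_pvz.py | get_sum_time
-- ===== SOURCE A (Python) =====
-- def get_sum_time(n: int, b: int, data: list[int]):
--     deque = [None] * n
--     ans = 0
--     deq_pos = 0
--     deq_start = 0
--     for i in range(n):
--         this_minute_may_serve = b
--         deque[deq_pos] = [data[i], i]
--         while deq_start < n and deque[deq_start]:
--             if this_minute_may_serve >= deque[deq_start][0]:
--                 this_minute_may_serve -= deque[deq_start][0]
--                 ans += deque[deq_start][0] * (i + 1 - deque[deq_start][1])
--                 deq_start += 1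
--                 continue
--             else:
--                 deque[deq_start][0] -= this_minute_may_serve
--                 ans += this_minute_may_serve * (i + 1 - deque[deq_start][1])
--                 break
--         deq_pos += 1
--     for item in deque[deq_start:]:
--         ans += item[0] * (n + 1 - item[1])
--
--     return ans
-- ===== SOURCE B (Python) =====
-- def get_sum_time(n: int, b: int, data: list[int]):
--     backlog = 0
--     serve_acc = 0
--     arrive_acc = 0
--     for i in range(n):
--         backlog += data[i]
--         arrive_acc += data[i] * i
--         served = min(b, backlog)
--         backlog -= served
--         serve_acc += served * (i + 1)
--     return serve_acc + backlog * (n + 1) - arrive_acc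
-- ===== Notes on version B (the rewrite author's own statement) =====
-- stated objective: simpler
-- what changed: Replaced A's preallocated queue array, two pointers and inner while loop by a single backlog counter with two running sums (serve-time contributions minus arrival-time contributions), using served = min(b, backlog) per minute and backlog*(n+1) for leftovers.
-- outside the precondition, e.g. on get_sum_time(2, 1, [3, -5]): A returns -4, B returns 0
import Mathlib
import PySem

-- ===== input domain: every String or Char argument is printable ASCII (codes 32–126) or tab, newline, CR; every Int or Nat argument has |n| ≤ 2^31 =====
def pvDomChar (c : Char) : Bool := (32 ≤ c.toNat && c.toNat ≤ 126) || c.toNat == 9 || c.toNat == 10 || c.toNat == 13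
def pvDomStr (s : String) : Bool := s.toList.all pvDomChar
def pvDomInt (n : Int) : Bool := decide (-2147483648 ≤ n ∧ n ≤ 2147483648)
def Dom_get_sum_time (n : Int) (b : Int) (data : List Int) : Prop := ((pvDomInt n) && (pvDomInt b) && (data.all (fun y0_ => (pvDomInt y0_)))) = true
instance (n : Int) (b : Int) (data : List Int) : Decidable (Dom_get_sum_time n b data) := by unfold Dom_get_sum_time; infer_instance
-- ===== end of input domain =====

-- B replaces A's queue array, two pointers and inner while loop by a single backlog counter
-- and two running sums (serve-time minus arrival-time contributions): simpler, same O(n) cost.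


-- ===== PORT A =====
-- the inner `while deq_start < n and deque[deq_start]` loop: advances deq_start while the
-- front item can be served fully, else decrements it in place and breaks
def pvServeA (dq : List (Int × Int)) (start : Nat) (i : Int) (c : Int) (ans : Int) :
    List (Int × Int) × Nat × Int :=
  if h : start < dq.length then
    let p := dq[start]
    if p.1 ≤ c then
      pvServeA dq (start + 1) i (c - p.1) (ans + p.1 * (i + 1 - p.2))
    else
      (dq.set start (p.1 - c, p.2), start, ans + c * (i + 1 - p.2))
  else (dq, start, ans)
termination_by dq.length - start

-- one iteration of A's `for i in range(n)`: deque[deq_pos] = [data[i], i], then the while loop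
-- (dq is the filled prefix of A's deque; deq_pos is implicitly dq.length)
def pvStepA (data : List Int) (b : Int) (st : List (Int × Int) × Nat × Int) (i : Int) :
    List (Int × Int) × Nat × Int :=
  pvServeA (st.1 ++ [((PySem.List.pyGet? data i).getD 0, i)]) st.2.1 i b st.2.2

def get_sum_time (n : Int) (b : Int) (data : List Int) : Int :=
  let st := (PySem.List.pyRange 0 n 1).foldl (pvStepA data b) ([], 0, 0)
  (st.1.drop st.2.1).foldl (fun a p => a + p.1 * (n + 1 - p.2)) st.2.2

-- ===== PORT B =====
-- one iteration of B's loop: state = (backlog, serve_acc, arrive_acc)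
def pvStepB (data : List Int) (b : Int) (st : Int × Int × Int) (i : Int) : Int × Int × Int :=
  let d := (PySem.List.pyGet? data i).getD 0
  let backlog := st.1 + d
  let arrive := st.2.2 + d * i
  let served := min b backlog
  (backlog - served, st.2.1 + served * (i + 1), arrive)

def get_sum_time_alt (n : Int) (b : Int) (data : List Int) : Int :=
  let st := (PySem.List.pyRange 0 n 1).foldl (pvStepB data b) (0, 0, 0)
  st.2.1 + st.1 * (n + 1) - st.2.2

-- ===== PRECONDITION & SPEC =====
-- Pre_ excludes n > len(data), where A raises IndexError, and negative values among the first
-- n demands, where A's per-item greedy with break and B's aggregate backlog are two equally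
-- accidental readings of a meaningless input (negative request sizes).
def Pre_get_sum_time (n : Int) (b : Int) (data : List Int) : Prop :=
  n ≤ (data.length : Int) ∧ ∀ x ∈ data.take n.toNat, 0 ≤ x
instance (n : Int) (b : Int) (data : List Int) : Decidable (Pre_get_sum_time n b data) := by
  unfold Pre_get_sum_time; infer_instance
def pvWitness_get_sum_time : Int × Int × List Int := (3, 2, [1, 2, 3])

def Spec_get_sum_time (n : Int) (b : Int) (data : List Int) (out : Int) : Prop := out = get_sum_time_alt n b data
instance (n : Int) (b : Int) (data : List Int) (out : Int) : Decidable (Spec_get_sum_time n b data out) := by unfold Spec_get_sum_time; infer_instance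

-- ===== CLAIM (what is proved, stated in full; the proofs are below) =====
def Claim_equal_get_sum_time : Prop := ∀ (n : Int) (b : Int) (data : List Int), Dom_get_sum_time n b data → Pre_get_sum_time n b data → Spec_get_sum_time n b data (get_sum_time n b data)

-- ===== LEMMAS AND PROOFS =====

-- total remaining demand / index-weighted demand of the active part of the queue
def pvBsum (l : List (Int × Int)) : Int := (l.map Prod.fst).sum
def pvQsum (l : List (Int × Int)) : Int := (l.map (fun p => p.1 * p.2)).sum

lemma pvBsum_append (l m : List (Int × Int)) : pvBsum (l ++ m) = pvBsum l + pvBsum m := by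
  simp [pvBsum]
lemma pvQsum_append (l m : List (Int × Int)) : pvQsum (l ++ m) = pvQsum l + pvQsum m := by
  simp [pvQsum]

lemma pvBsum_cons (x : Int × Int) (l : List (Int × Int)) :
    pvBsum (x :: l) = x.1 + pvBsum l := by simp [pvBsum]
lemma pvQsum_cons (x : Int × Int) (l : List (Int × Int)) :
    pvQsum (x :: l) = x.1 * x.2 + pvQsum l := by simp [pvQsum]
lemma pvBsum_nonneg (l : List (Int × Int)) (h : ∀ p ∈ l, 0 ≤ p.1) : 0 ≤ pvBsum l := by
  have := List.sum_nonneg (l := l.map Prod.fst) (by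
    intro x hx; obtain ⟨q, hq, rfl⟩ := List.mem_map.mp hx; exact h q hq)
  simpa [pvBsum] using this

-- what one round of the while loop does, given nonnegative active demands
lemma pvServeA_spec (dq : List (Int × Int)) (start : Nat) (i c ans : Int)
    (hsl : start ≤ dq.length)
    (hc : start < dq.length ∨ 0 ≤ c)
    (hnn : ∀ p ∈ dq.drop start, 0 ≤ p.1) :
    (pvServeA dq start i c ans).1.length = dq.length ∧
    (pvServeA dq start i c ans).2.1 ≤ dq.length ∧
    (∀ p ∈ (pvServeA dq start i c ans).1.drop (pvServeA dq start i c ans).2.1, 0 ≤ p.1) ∧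
    pvBsum ((pvServeA dq start i c ans).1.drop (pvServeA dq start i c ans).2.1)
      = pvBsum (dq.drop start) - min c (pvBsum (dq.drop start)) ∧
    (pvServeA dq start i c ans).2.2
      = ans + (min c (pvBsum (dq.drop start))) * (i + 1)
          + pvQsum ((pvServeA dq start i c ans).1.drop (pvServeA dq start i c ans).2.1)
          - pvQsum (dq.drop start) := by
  fun_induction pvServeA dq start i c ans with
  | case1 start c ans h p hle ih =>
    have hdrop : dq.drop start = p :: dq.drop (start + 1) := by
      rw [List.drop_eq_getElem_cons h]
    have hnn' : ∀ q ∈ dq.drop (start + 1), 0 ≤ q.1 := by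
      intro q hq; exact hnn q (by rw [hdrop]; exact List.mem_cons_of_mem _ hq)
    have hp0 : 0 ≤ p.1 := hnn p (by rw [hdrop]; exact List.mem_cons_self)
    obtain ⟨h1, h2, h3, h4, h5⟩ := ih (by omega) (Or.inr (by omega)) hnn'
    have hmin : min c (pvBsum (dq.drop start))
        = p.1 + min (c - p.1) (pvBsum (dq.drop (start + 1))) := by
      rw [hdrop, pvBsum_cons]; omega
    refine ⟨h1, h2, h3, ?_, ?_⟩
    · rw [h4, hmin, hdrop, pvBsum_cons]; omega
    · rw [h5, hmin, hdrop, pvQsum_cons]; ring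
  | case2 start c ans h p hgt =>
    have hdrop : dq.drop start = p :: dq.drop (start + 1) := by
      rw [List.drop_eq_getElem_cons h]
    have hp0 : 0 ≤ p.1 := hnn p (by rw [hdrop]; exact List.mem_cons_self)
    have hTnn : 0 ≤ pvBsum (dq.drop (start + 1)) := by
      refine pvBsum_nonneg _ (fun q hq => hnn q ?_)
      rw [hdrop]; exact List.mem_cons_of_mem _ hq
    have hmin : min c (pvBsum (dq.drop start)) = c := by
      rw [hdrop, pvBsum_cons]; omega
    have hset : (dq.set start (p.1 - c, p.2)).drop start
        = (p.1 - c, p.2) :: dq.drop (start + 1) := by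
      rw [List.drop_eq_getElem_cons (by simpa using h)]
      rw [List.drop_set]
      simp [List.getElem_set_self]
    refine ⟨by simp, by omega, ?_, ?_, ?_⟩
    · intro q hq; rw [hset] at hq
      rcases List.mem_cons.mp hq with h' | h'
      · subst h'; simp; omega
      · exact hnn q (by rw [hdrop]; exact List.mem_cons_of_mem _ h')
    · rw [hset, hmin, hdrop]; simp only [pvBsum_cons]; omega
    · rw [hset, hmin, hdrop]; simp only [pvQsum_cons]; ring
  | case3 start c ans h =>
    have hc0 : 0 ≤ c := by cases hc with | inl h' => omega | inr h' => exact h'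
    have hdrop : dq.drop start = [] := List.drop_eq_nil_of_le (by omega)
    have hm : min c (pvBsum ([] : List (Int × Int))) = 0 := by simp [pvBsum]; omega
    refine ⟨rfl, by omega, hnn, ?_, ?_⟩
    · rw [hdrop, hm]; simp
    · rw [hdrop, hm]; simp

-- the loop invariant tying A's (deque, deq_start, ans) to B's (backlog, serve_acc, arrive_acc)
lemma pvLoop_inv (data : List Int) (b : Int) :
    ∀ (is : List Int) (dq : List (Int × Int)) (start : Nat) (ans backlog serve arrive : Int),
    (∀ i ∈ is, ∃ k : Nat, i = (k : Int) ∧ ∃ h : k < data.length, 0 ≤ data[k]) →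
    start ≤ dq.length →
    (∀ p ∈ dq.drop start, 0 ≤ p.1) →
    backlog = pvBsum (dq.drop start) →
    ans = serve - arrive + pvQsum (dq.drop start) →
    (is.foldl (pvStepA data b) (dq, start, ans)).2.1
        ≤ (is.foldl (pvStepA data b) (dq, start, ans)).1.length ∧
    (∀ p ∈ (is.foldl (pvStepA data b) (dq, start, ans)).1.drop
        (is.foldl (pvStepA data b) (dq, start, ans)).2.1, 0 ≤ p.1) ∧
    (is.foldl (pvStepB data b) (backlog, serve, arrive)).1
        = pvBsum ((is.foldl (pvStepA data b) (dq, start, ans)).1.drop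
            (is.foldl (pvStepA data b) (dq, start, ans)).2.1) ∧
    (is.foldl (pvStepA data b) (dq, start, ans)).2.2
        = (is.foldl (pvStepB data b) (backlog, serve, arrive)).2.1
          - (is.foldl (pvStepB data b) (backlog, serve, arrive)).2.2
          + pvQsum ((is.foldl (pvStepA data b) (dq, start, ans)).1.drop
              (is.foldl (pvStepA data b) (dq, start, ans)).2.1) := by
  intro is
  induction is with
  | nil =>
    intro dq start ans backlog serve arrive _ hlen hnn hB hQ
    simp only [List.foldl_nil]
    exact ⟨hlen, hnn, hB.symm ▸ rfl, by rw [hQ]⟩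
  | cons i is ih =>
    intro dq start ans backlog serve arrive hks hlen hnn hB hQ
    obtain ⟨k, rfl, hk, hdk⟩ := hks i List.mem_cons_self
    simp only [List.foldl_cons]
    -- unfold one A step
    have hdropA : (dq ++ [(data[k], ((k : Nat) : Int))]).drop start
        = dq.drop start ++ [(data[k], ((k : Nat) : Int))] :=
      List.drop_append_of_le_length hlen
    have hnn0 : ∀ p ∈ (dq ++ [(data[k], ((k : Nat) : Int))]).drop start, 0 ≤ p.1 := by
      intro p hp; rw [hdropA] at hp
      rcases List.mem_append.mp hp with h' | h'
      · exact hnn p h'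
      · simp at h'; subst h'; exact hdk
    have hlt : start < (dq ++ [(data[k], ((k : Nat) : Int))]).length := by
      simp; omega
    have hs := pvServeA_spec (dq ++ [(data[k], ((k : Nat) : Int))]) start ((k : Nat) : Int)
        b (ans) (by omega) (Or.inl hlt) hnn0
    obtain ⟨hL, hS, hN, hBs, hAs⟩ := hs
    have hstepA : pvStepA data b (dq, start, ans) ((k : Nat) : Int)
        = pvServeA (dq ++ [(data[k], ((k : Nat) : Int))]) start ((k : Nat) : Int) b ans := by
      simp [pvStepA, List.getElem?_eq_getElem hk]
    have hB0 : pvBsum ((dq ++ [(data[k], ((k : Nat) : Int))]).drop start)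
        = backlog + data[k] := by rw [hdropA, pvBsum_append, hB]; simp [pvBsum]
    have hQ0 : pvQsum ((dq ++ [(data[k], ((k : Nat) : Int))]).drop start)
        = pvQsum (dq.drop start) + data[k] * ((k : Nat) : Int) := by
      rw [hdropA, pvQsum_append]; simp [pvQsum]
    have hstepB : pvStepB data b (backlog, serve, arrive) ((k : Nat) : Int)
        = (backlog + data[k] - min b (backlog + data[k]),
           serve + min b (backlog + data[k]) * (((k : Nat) : Int) + 1),
           arrive + data[k] * ((k : Nat) : Int)) := by
      simp [pvStepB, List.getElem?_eq_getElem hk]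
    rw [hstepA, hstepB]
    apply ih
    · intro j hj; exact hks j (List.mem_cons_of_mem _ hj)
    · exact hL ▸ hS
    · exact hN
    · rw [hBs, hB0]
    · rw [hAs, hB0, hQ0, hQ]; ring
-- the final for loop over deque[deq_start:] sums v*(n+1-j)
lemma pvFinal_fold (n : Int) :
    ∀ (l : List (Int × Int)) (a : Int),
    l.foldl (fun a p => a + p.1 * (n + 1 - p.2)) a = a + pvBsum l * (n + 1) - pvQsum l := by
  intro l
  induction l with
  | nil => intro a; simp [pvBsum, pvQsum]
  | cons p l ih => intro a; simp only [List.foldl_cons, ih, pvBsum, pvQsum, List.map_cons,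
      List.sum_cons]; ring

-- ===== VERDICT (by name: the statement is the Claim_ definition above) =====
theorem get_sum_time_spec : Claim_equal_get_sum_time := by
  unfold Claim_equal_get_sum_time
  intro n b data _ hpre
  obtain ⟨hn, hnn⟩ := hpre
  unfold Spec_get_sum_time get_sum_time get_sum_time_alt
  have hks : ∀ i ∈ PySem.List.pyRange 0 n 1,
      ∃ k : Nat, i = (k : Int) ∧ ∃ h : k < data.length, 0 ≤ data[k] := by
    intro i hi
    obtain ⟨h0, hin⟩ := (PySem.List.mem_pyRange_one).mp hi
    have hkl : i.toNat < data.length := by omega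
    refine ⟨i.toNat, by omega, hkl, ?_⟩
    have hkn : i.toNat < n.toNat := by omega
    have h3 : i.toNat < (data.take n.toNat).length := by simp; omega
    have h4 : (data.take n.toNat)[i.toNat] = data[i.toNat] := by simp
    exact hnn _ (h4 ▸ List.getElem_mem h3)
  have h := pvLoop_inv data b (PySem.List.pyRange 0 n 1) [] 0 0 0 0 0 hks
    (by simp) (by simp) (by simp [pvBsum]) (by simp [pvQsum])
  obtain ⟨h1, h2, h3, h4⟩ := h
  simp only []
  rw [pvFinal_fold, h4, h3]
  ring
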